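-- pv_equiv track=rewrite | github.com/DrMantaRay/Scrabbler | Scrabbler.py | blank_replace
-- ===== SOURCE A (Python) =====
-- def blank_replace(string, substring):
--     return_string = []
--     i = 0
--     for char in string:
--         if char == '/':
--             return_string.append(substring[i])
--             i += 1
--         else:
--             return_string.append(char)
--     return ''.join(return_string)
-- ===== SOURCE B (Python) =====
-- def blank_replace(string, substring):
--     parts = string.split('/')
--     out = [parts[0]]
--     for idx in range(len(parts) - 1):
--         out.append(substring[idx])
--         out.append(parts[idx + 1])
--     return ''.join(out)
-- ===== Notes on version B (the rewrite author's own statement) =====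
-- stated objective: faster
-- what changed: Replaces the char-by-char scan with a counter by a two-phase build: split the string on '/' once, then interleave the segments with the substring's characters by segment index; the per-character Python loop disappears into str.split/str.join.
import Mathlib
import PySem

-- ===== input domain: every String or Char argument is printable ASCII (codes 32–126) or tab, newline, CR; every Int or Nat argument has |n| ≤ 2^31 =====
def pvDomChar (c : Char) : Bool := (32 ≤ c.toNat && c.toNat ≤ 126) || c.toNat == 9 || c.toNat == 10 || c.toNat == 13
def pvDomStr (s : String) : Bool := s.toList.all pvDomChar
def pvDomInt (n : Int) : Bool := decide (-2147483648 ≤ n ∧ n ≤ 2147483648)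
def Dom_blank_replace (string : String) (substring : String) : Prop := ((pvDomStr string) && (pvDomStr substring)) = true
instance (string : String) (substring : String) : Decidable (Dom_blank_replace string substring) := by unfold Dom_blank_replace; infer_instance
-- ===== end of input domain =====

-- B replaces A's char-by-char scan with a two-phase build (split on '/', then interleave segments with substring chars); return values agree on Pre_ (no '/'-count overflow).

-- ===== PORT A =====
-- A appends substring[i] (raising IndexError when i is out of range — excluded by Pre_,
-- ported with pyGetD) or the char itself; state is (accumulated chars, i).
def blank_replace (string : String) (substring : String) : String :=
  let r := string.toList.foldl
    (fun (st : List Char × Nat) c =>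
      if c = '/' then (st.1 ++ [PySem.List.pyGetD substring.toList (st.2 : Int) ' '], st.2 + 1)
      else (st.1 ++ [c], st.2))
    ([], 0)
  String.ofList r.1

-- ===== PORT B =====
-- B: parts = string.split('/'); out = parts[0]; for idx in range(len(parts)-1):
--   out += substring[idx] (IndexError excluded by Pre_, ported with pyGetD) + parts[idx+1].
def blank_replace_alt (string : String) (substring : String) : String :=
  let parts := PySem.Chars.splitOn string.toList ['/']
  let out := (PySem.List.pyRange 0 ((parts.length : Int) - 1) 1).foldl
    (fun acc idx =>
      acc ++ [PySem.List.pyGetD substring.toList idx ' '] ++ PySem.List.pyGetD parts (idx + 1) [])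
    (PySem.List.pyGetD parts 0 [])
  String.ofList out

-- ===== PRECONDITION & SPEC =====
-- Pre_ excludes exactly the inputs where string has more '/' than substring has characters:
-- there both A and B raise IndexError.
def Pre_blank_replace (string : String) (substring : String) : Prop :=
  string.toList.count '/' ≤ substring.toList.length
instance (string : String) (substring : String) : Decidable (Pre_blank_replace string substring) := by unfold Pre_blank_replace; infer_instance

def pvWitness_blank_replace : String × String := ("a/b/c", "xy")

def Spec_blank_replace (string : String) (substring : String) (out : String) : Prop := out = blank_replace_alt string substring
instance (string : String) (substring : String) (out : String) : Decidable (Spec_blank_replace string substring out) := by unfold Spec_blank_replace; infer_instance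

-- ===== CLAIM (what is proved, stated in full; the proofs are below) =====
def Claim_equal_blank_replace : Prop := ∀ (string : String) (substring : String), Dom_blank_replace string substring → Pre_blank_replace string substring → Spec_blank_replace string substring (blank_replace string substring)

-- ===== LEMMAS AND PROOFS =====

-- Reference split on '/' with an accumulator for the current (reversed) segment.
def pvSplit : List Char → List Char → List (List Char)
  | [], cur => [cur.reverse]
  | c :: rest, cur => if c = '/' then cur.reverse :: pvSplit rest [] else pvSplit rest (c :: cur)

-- Interleaving: substring char at index i, then the segment, for each remaining segment.
def pvGo (sub : List Char) : List (List Char) → Nat → List Char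
  | [], _ => []
  | p :: ps, i => PySem.List.pyGetD sub (i : Int) ' ' :: p ++ pvGo sub ps (i + 1)

lemma pvSplit_ne_nil (l cur : List Char) : pvSplit l cur ≠ [] := by
  induction l generalizing cur with
  | nil => simp [pvSplit]
  | cons c rest ih => simp only [pvSplit]; split_ifs <;> simp [ih]

lemma pvSplit_cur (l cur : List Char) :
    pvSplit l cur = (pvSplit l []).modifyHead (cur.reverse ++ ·) := by
  induction l generalizing cur with
  | nil => simp [pvSplit]
  | cons c rest ih =>
    simp only [pvSplit]
    split_ifs with h
    · rcases h; simp
    · rw [ih (c :: cur), ih [c]]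
      obtain ⟨p, ps, hps⟩ := List.exists_cons_of_ne_nil (pvSplit_ne_nil rest [])
      simp [hps]

lemma splitOn_go_eq (l cur : List Char) (acc : List (List Char)) (fuel : Nat)
    (h : l.length < fuel) :
    PySem.Chars.splitOn.go ['/'] fuel l cur acc = acc.reverse ++ pvSplit l cur := by
  induction l generalizing cur acc fuel with
  | nil =>
    obtain ⟨f, rfl⟩ := Nat.exists_eq_succ_of_ne_zero (by omega : fuel ≠ 0)
    simp [PySem.Chars.splitOn.go, pvSplit]
  | cons c rest ih =>
    obtain ⟨f, rfl⟩ := Nat.exists_eq_succ_of_ne_zero (by omega : fuel ≠ 0)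
    simp only [PySem.Chars.splitOn.go, pvSplit]
    by_cases hc : c = '/'
    · rcases hc
      rw [if_pos (by simp), if_pos rfl]
      simp only [List.length_cons, List.length_nil, List.drop_succ_cons, List.drop_zero]
      rw [ih [] (cur.reverse :: acc) f (by simpa using Nat.lt_of_succ_lt_succ h)]
      simp
    · rw [if_neg (by simp [List.isPrefixOf]; exact Ne.symm hc), if_neg hc]
      exact ih (c :: cur) acc f (by simpa using Nat.lt_of_succ_lt_succ h)

lemma splitOn_eq (l : List Char) :
    PySem.Chars.splitOn l ['/'] = pvSplit l [] := by
  have := splitOn_go_eq l [] [] (l.length + 1) (by omega)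
  simpa [PySem.Chars.splitOn] using this

-- A's foldl, from state (acc, i), appends the interleaving of pvSplit l [] starting at index i.
lemma foldA_eq (sub : List Char) (l : List Char) (acc : List Char) (i : Nat) :
    l.foldl
      (fun (st : List Char × Nat) c =>
        if c = '/' then (st.1 ++ [PySem.List.pyGetD sub (st.2 : Int) ' '], st.2 + 1)
        else (st.1 ++ [c], st.2)) (acc, i)
    = (acc ++ (pvSplit l []).headI ++ pvGo sub (pvSplit l []).tail i,
       i + l.count '/') := by
  induction l generalizing acc i with
  | nil => simp [pvSplit, pvGo]
  | cons c rest ih =>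
    by_cases hc : c = '/'
    · rcases hc
      simp only [List.foldl_cons, pvSplit]
      rw [ih]
      obtain ⟨p, ps, hps⟩ := List.exists_cons_of_ne_nil (pvSplit_ne_nil rest [])
      simp [hps, pvGo]
      omega
    · simp only [List.foldl_cons, pvSplit, if_neg hc]
      rw [ih, pvSplit_cur rest [c]]
      obtain ⟨p, ps, hps⟩ := List.exists_cons_of_ne_nil (pvSplit_ne_nil rest [])
      simp [hps, hc]

-- B's foldl over the index range, started at k, appends the interleaving of the
-- remaining segments parts.drop (k+1) starting at substring index k.
lemma foldB_eq (sub : List Char) (parts : List (List Char)) (k : Nat) (acc : List Char) :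
    (PySem.List.pyRange (k : Int) ((parts.length : Int) - 1) 1).foldl
      (fun acc idx =>
        acc ++ [PySem.List.pyGetD sub idx ' '] ++ PySem.List.pyGetD parts (idx + 1) []) acc
    = acc ++ pvGo sub (parts.drop (k + 1)) k := by
  by_cases hk : k + 1 < parts.length
  · have hstep : ((k : Int)) < (parts.length : Int) - 1 := by omega
    rw [PySem.List.pyRange_one_cons hstep, List.foldl_cons]
    have hdrop : parts.drop (k + 1) = parts[k + 1] :: parts.drop (k + 2) :=
      List.drop_eq_getElem_cons hk
    have h2 : ((k : Int) + 1) = ((k + 1 : Nat) : Int) := by push_cast; ring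
    have := foldB_eq sub parts (k + 1)
      (acc ++ [PySem.List.pyGetD sub (k : Int) ' '] ++ PySem.List.pyGetD parts ((k : Int) + 1) [])
    rw [show ((k : Int) + 1) = ((k + 1 : Nat) : Int) by push_cast; ring] at this ⊢
    rw [this, hdrop]
    simp [pvGo, PySem.List.pyGetD_natCast, List.getD]
    rw [h2, PySem.List.pyGetD_natCast]
    simp [List.getD, hk]
  · have hend : ¬ ((k : Int)) < (parts.length : Int) - 1 := by omega
    rw [PySem.List.pyRange_one_eq_nil (by omega)]
    have : parts.drop (k + 1) = [] := List.drop_eq_nil_of_le (by omega)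
    simp [this, pvGo]
termination_by parts.length - k

-- ===== VERDICT (by name: the statement is the Claim_ definition above) =====
theorem blank_replace_spec : Claim_equal_blank_replace := by
  intro s sub _ _
  show blank_replace s sub = blank_replace_alt s sub
  unfold blank_replace blank_replace_alt
  simp only [splitOn_eq, foldA_eq]
  have h0 := foldB_eq sub.toList (pvSplit s.toList []) 0
    (PySem.List.pyGetD (pvSplit s.toList []) 0 [])
  simp only [Nat.cast_zero] at h0
  rw [h0]
  obtain ⟨p, ps, hps⟩ := List.exists_cons_of_ne_nil (pvSplit_ne_nil s.toList [])
  simp [hps]
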